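-- pv_equiv track=rewrite | github.com/nishantsirohi23/projects | leetcode/stringrporpr.py | adjacentElementsSumIndex
-- ===== SOURCE A (Python) =====
-- def adjacentElementsSumIndex(inputArray):
--     #initialize the min sum to the first two elements
--     min_sum = inputArray[0] + inputArray[1]
--     #initialize the index to the first pair
--     index = 0
--     #loop through the array
--     for i in range(len(inputArray)-1):
--         #compare the current sum to the min sum
--         if inputArray[i] + inputArray[i+1] < min_sum:
--             #if the current sum is less than the min sum, set the min sum to the current sum
--             min_sum = inputArray[i] + inputArray[i+1]
--             #set the index to the current index
--             index = i
--
--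
--
--     return min_sum , index
-- ===== SOURCE B (Python) =====
-- def adjacentElementsSumIndex(inputArray):
--     sums = [inputArray[i] + inputArray[i + 1] for i in range(len(inputArray) - 1)]
--     m = min(sums)
--     return m, sums.index(m)
-- ===== Notes on version B (the rewrite author's own statement) =====
-- stated objective: simpler
-- what changed: Replaces the manual running-minimum loop over indices (with init duplicating the first pair and a redundant i=0 comparison) by building the list of adjacent-pair sums once and using the builtin min plus list.index for the first minimal position.
import Mathlib
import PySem

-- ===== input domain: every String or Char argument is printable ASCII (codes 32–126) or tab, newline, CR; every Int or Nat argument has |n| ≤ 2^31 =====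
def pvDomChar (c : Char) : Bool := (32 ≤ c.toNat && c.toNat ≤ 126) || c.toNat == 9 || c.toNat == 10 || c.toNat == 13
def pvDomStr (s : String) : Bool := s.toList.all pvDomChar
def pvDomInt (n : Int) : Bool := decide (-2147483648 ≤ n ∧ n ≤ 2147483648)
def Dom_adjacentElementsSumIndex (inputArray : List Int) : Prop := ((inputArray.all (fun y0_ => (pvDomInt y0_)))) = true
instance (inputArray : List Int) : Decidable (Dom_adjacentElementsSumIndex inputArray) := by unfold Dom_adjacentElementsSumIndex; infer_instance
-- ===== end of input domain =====

-- B builds the adjacent-pair sums once and takes min + first index, instead of A's manual running-minimum loop; objective: simpler.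


-- ===== PORT A =====
def adjacentElementsSumIndex (inputArray : List Int) : Int × Int :=
  let init : Int × Int := (PySem.List.pyGetD inputArray 0 0 + PySem.List.pyGetD inputArray 1 0, 0)
  (PySem.List.pyRange 0 ((inputArray.length : Int) - 1) 1).foldl
    (fun st i =>
      if PySem.List.pyGetD inputArray i 0 + PySem.List.pyGetD inputArray (i + 1) 0 < st.1 then
        (PySem.List.pyGetD inputArray i 0 + PySem.List.pyGetD inputArray (i + 1) 0, i)
      else st) init

-- ===== PORT B =====
def adjacentElementsSumIndex_alt (inputArray : List Int) : Int × Int :=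
  let sums := (PySem.List.pyRange 0 ((inputArray.length : Int) - 1) 1).map
    (fun i => PySem.List.pyGetD inputArray i 0 + PySem.List.pyGetD inputArray (i + 1) 0)
  match PySem.List.min? sums (fun x => x) with
  | some m => (m, ((PySem.List.index? sums m).getD 0 : Nat))
  | none => (0, 0)

-- ===== PRECONDITION & SPEC =====
-- Pre_: A raises IndexError on lists of length < 2 (inputArray[1] on the first line); B raises ValueError there (min of []).
def Pre_adjacentElementsSumIndex (inputArray : List Int) : Prop := 2 ≤ inputArray.length
instance (inputArray : List Int) : Decidable (Pre_adjacentElementsSumIndex inputArray) := by unfold Pre_adjacentElementsSumIndex; infer_instance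
def pvWitness_adjacentElementsSumIndex : List Int := [3, 1, 4, 1]
def Spec_adjacentElementsSumIndex (inputArray : List Int) (out : Int × Int) : Prop := out = adjacentElementsSumIndex_alt inputArray
instance (inputArray : List Int) (out : Int × Int) : Decidable (Spec_adjacentElementsSumIndex inputArray out) := by unfold Spec_adjacentElementsSumIndex; infer_instance

-- ===== CLAIM (what is proved, stated in full; the proofs are below) =====
def Claim_equal_adjacentElementsSumIndex : Prop := ∀ (inputArray : List Int), Dom_adjacentElementsSumIndex inputArray → Pre_adjacentElementsSumIndex inputArray → Spec_adjacentElementsSumIndex inputArray (adjacentElementsSumIndex inputArray)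


-- ===== LEMMAS AND PROOFS =====

-- adjacent-pair sum at Nat index k
def pvG (xs : List Int) (k : Nat) : Int := xs.getD k 0 + xs.getD (k + 1) 0

theorem foldl_min_le (x : Int) (t : List Int) : t.foldl min x ≤ x ∧ ∀ y ∈ t, t.foldl min x ≤ y := by
  induction t generalizing x with
  | nil => simp
  | cons a t ih =>
    obtain ⟨h1, h2⟩ := ih (min x a)
    refine ⟨le_trans h1 (min_le_left _ _), ?_⟩
    intro y hy
    rcases List.mem_cons.mp hy with rfl | hy
    · exact le_trans h1 (min_le_right _ _)
    · exact h2 y hy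

theorem foldl_min_mem (x : Int) (t : List Int) : t.foldl min x = x ∨ t.foldl min x ∈ t := by
  induction t generalizing x with
  | nil => simp
  | cons a t ih =>
    rcases ih (min x a) with h | h
    · rcases min_cases x a with ⟨hm, _⟩ | ⟨hm, _⟩
      · left; rw [List.foldl_cons, h, hm]
      · right; rw [List.foldl_cons, h, hm]; exact List.mem_cons_self ..
    · right; exact List.mem_cons_of_mem _ h

-- A's running-minimum fold over indices equals (min, first index) of the mapped sums list.
theorem fold_eq_min_index (g : Nat → Int) (m : Nat) :
    (List.range (m + 1)).foldl
      (fun (st : Int × Int) k => if g k < st.1 then (g k, (k : Int)) else st) (g 0, 0)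
    = (((List.range (m + 1)).map g).foldl min (g 0),
       (((PySem.List.index? ((List.range (m + 1)).map g)
            (((List.range (m + 1)).map g).foldl min (g 0))).getD 0 : Nat) : Int)) := by
  induction m with
  | zero =>
    simp [List.range_succ]
  | succ m ih =>
    have hrange : List.range (m + 1 + 1) = List.range (m + 1) ++ [m + 1] := List.range_succ
    set L := (List.range (m + 1)).map g with hL
    set v := L.foldl min (g 0) with hv
    have hvle : ∀ y ∈ L, v ≤ y := (foldl_min_le (g 0) L).2
    have hvmem : v ∈ L := by
      rcases foldl_min_mem (g 0) L with h | h
      · rw [hv, h]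
        have h0 : (0 : Nat) ∈ List.range (m + 1) := by simp
        exact List.mem_map_of_mem h0
      · exact h
    rw [hrange, List.foldl_append, ih]
    have hmap2 : List.map g (List.range (m + 1) ++ [m + 1]) = L ++ [g (m + 1)] := by
      simp [hL]
    have hfold : (L ++ [g (m + 1)]).foldl min (g 0) = min v (g (m + 1)) := by
      simp [List.foldl_append, hv]
    rw [hmap2, hfold]
    by_cases h : g (m + 1) < v
    · have hne : g (m + 1) ∉ L := fun hc => absurd (hvle _ hc) (not_le.mpr h)
      have hidx : PySem.List.index? (L ++ [g (m + 1)]) (g (m + 1)) = some L.length :=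
        PySem.List.index?_append_singleton_self _ _ hne
      have hlen : L.length = m + 1 := by simp [hL]
      have hmin : min v (g (m + 1)) = g (m + 1) := min_eq_right (le_of_lt h)
      simp only [List.foldl_cons, List.foldl_nil, if_pos h, hmin, hidx, hlen, Option.getD_some]
    · have hmin : min v (g (m + 1)) = v := min_eq_left (not_lt.mp h)
      have hidx : PySem.List.index? (L ++ [g (m + 1)]) v = PySem.List.index? L v :=
        PySem.List.index?_append_of_mem _ hvmem
      simp only [List.foldl_cons, List.foldl_nil, if_neg h, hmin, hidx]

theorem pyG_eq (xs : List Int) (k : Nat) :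
    PySem.List.pyGetD xs (k : Int) 0 + PySem.List.pyGetD xs ((k : Int) + 1) 0 = pvG xs k := by
  have hk : ((k : Int) + 1) = ((k + 1 : Nat) : Int) := by push_cast; ring
  rw [hk, PySem.List.pyGetD_natCast, PySem.List.pyGetD_natCast, pvG]

theorem portA_eq (xs : List Int) (h : 2 ≤ xs.length) :
    adjacentElementsSumIndex xs
    = (List.range (xs.length - 1)).foldl
        (fun (st : Int × Int) k => if pvG xs k < st.1 then (pvG xs k, (k : Int)) else st)
        (pvG xs 0, 0) := by
  have ht : ((xs.length : Int) - 1 - 0).toNat = xs.length - 1 := by omega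
  simp only [adjacentElementsSumIndex, PySem.List.pyRange_one, ht, List.foldl_map, zero_add,
    pyG_eq, pvG, PySem.List.pyGetD_ofNat']

theorem portB_eq (xs : List Int) (h : 2 ≤ xs.length) :
    adjacentElementsSumIndex_alt xs
    = (match PySem.List.min? ((List.range (xs.length - 1)).map (pvG xs)) (fun x => x) with
       | some m => (m, (((PySem.List.index? ((List.range (xs.length - 1)).map (pvG xs)) m).getD 0 : Nat) : Int))
       | none => ((0 : Int), (0 : Int))) := by
  have ht : ((xs.length : Int) - 1 - 0).toNat = xs.length - 1 := by omega
  simp only [adjacentElementsSumIndex_alt, PySem.List.pyRange_one, ht, List.map_map,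
    Function.comp_def, zero_add, pyG_eq]

-- ===== VERDICT (by name: the statement is the Claim_ definition above) =====
theorem adjacentElementsSumIndex_spec : Claim_equal_adjacentElementsSumIndex := by
  intro xs _ hpre
  unfold Spec_adjacentElementsSumIndex
  have h : 2 ≤ xs.length := hpre
  obtain ⟨m, hm⟩ : ∃ m, xs.length - 1 = m + 1 := ⟨xs.length - 2, by omega⟩
  rw [portA_eq xs h, portB_eq xs h, hm, fold_eq_min_index (pvG xs) m]
  have hcons : List.range (m + 1) = 0 :: List.map Nat.succ (List.range m) := List.range_succ_eq_map
  set rest := (List.map Nat.succ (List.range m)).map (pvG xs) with hrest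
  have hmap : (List.range (m + 1)).map (pvG xs) = pvG xs 0 :: rest := by
    rw [hcons, List.map_cons]
  have hfold : (pvG xs 0 :: rest).foldl min (pvG xs 0) = rest.foldl min (pvG xs 0) := by
    rw [List.foldl_cons, min_self]
  rw [hmap, PySem.List.min?_id_cons, hfold]
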